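-- pv_equiv track=rewrite | github.com/OptMA-VLC/pyblocks | src/pyblock_sim/repository/cli/cli.py | _add_tag_before_every_line
-- ===== SOURCE A (Python) =====
-- def _add_tag_before_every_line(input_str: str, tag: str) -> str:
--     if not isinstance(input_str, str):
--         raise TypeError(f"Expected input_str to be a string but it is {type(input_str)}")
--
--     lines = input_str.split('\n')
--     result = ''
--
--     num_lines = len(lines)
--     for i in range(0, num_lines):
--         result += tag + lines[i]
--         if i < num_lines - 1:
--             result += '\n'
--
--     return result
-- ===== SOURCE B (Python) =====
-- def _add_tag_before_every_line(input_str: str, tag: str) -> str: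
--     if not isinstance(input_str, str):
--         raise TypeError(f"Expected input_str to be a string but it is {type(input_str)}")
--     return tag + input_str.replace('\n', '\n' + tag)
-- ===== Notes on version B (the rewrite author's own statement) =====
-- stated objective: idiomatic
-- what changed: Replaces the split-into-lines plus indexed accumulation loop with a single whole-string substitution: prepend the tag once and rewrite every newline as newline+tag.
import Mathlib
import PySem

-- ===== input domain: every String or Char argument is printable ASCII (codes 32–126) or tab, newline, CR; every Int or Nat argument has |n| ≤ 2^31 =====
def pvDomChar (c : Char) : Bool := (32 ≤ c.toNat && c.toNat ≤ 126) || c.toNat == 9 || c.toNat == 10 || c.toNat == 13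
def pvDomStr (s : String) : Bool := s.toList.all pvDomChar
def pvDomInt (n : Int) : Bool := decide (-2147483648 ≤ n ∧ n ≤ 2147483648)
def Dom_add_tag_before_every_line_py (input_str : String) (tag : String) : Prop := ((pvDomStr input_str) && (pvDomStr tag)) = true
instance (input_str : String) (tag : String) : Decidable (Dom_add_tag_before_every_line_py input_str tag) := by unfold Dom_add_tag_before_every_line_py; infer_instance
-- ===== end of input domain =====

-- B replaces A's split-into-lines + indexed accumulation loop by one whole-string
-- substitution (prepend tag once, rewrite each '\n' as '\n'+tag); same return value, no speed claim.

-- ===== PORT A =====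
-- literal port of A: split on '\n', then an indexed loop appending tag + line (+ '\n' except after the last)
def add_tag_before_every_line_py (input_str : String) (tag : String) : String :=
  match PySem.Str.split? input_str "\n" with
  | none => ""          -- unreachable: the separator "\n" is non-empty
  | some lines =>
      let num_lines : Int := lines.length
      String.ofList <|
        (PySem.List.pyRange 0 num_lines 1).foldl
          (fun result i =>
            let r := result ++ tag.toList ++ (PySem.List.pyGetD lines i "").toList
            if i < num_lines - 1 then r ++ ['\n'] else r)
          []

-- ===== PORT B =====
-- literal port of B: tag + input_str.replace('\n', '\n' + tag)
def add_tag_before_every_line_py_alt (input_str : String) (tag : String) : String :=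
  String.ofList (tag.toList ++ PySem.Chars.replace input_str.toList ['\n'] ('\n' :: tag.toList))

-- ===== PRECONDITION & SPEC =====
def Spec_add_tag_before_every_line_py (input_str : String) (tag : String) (out : String) : Prop := out = add_tag_before_every_line_py_alt input_str tag
instance (input_str : String) (tag : String) (out : String) : Decidable (Spec_add_tag_before_every_line_py input_str tag out) := by unfold Spec_add_tag_before_every_line_py; infer_instance

-- ===== CLAIM (what is proved, stated in full; the proofs are below) =====
def Claim_equal_add_tag_before_every_line_py : Prop := ∀ (input_str : String) (tag : String), Dom_add_tag_before_every_line_py input_str tag → Spec_add_tag_before_every_line_py input_str tag (add_tag_before_every_line_py input_str tag)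

-- ===== LEMMAS AND PROOFS =====

-- spec model of str.replace with a single-char pattern '\n'
def repC (new : List Char) : List Char → List Char
  | [] => []
  | c :: t => if c = '\n' then new ++ repC new t else c :: repC new t

-- spec model of str.split('\n') with an explicit current-piece prefix
def mysplit : List Char → List Char → List (List Char)
  | pre, [] => [pre]
  | pre, c :: t => if c = '\n' then pre :: mysplit [] t else mysplit (pre ++ [c]) t

-- what A's loop produces from the list of lines
def glue (tagL : List Char) : List (List Char) → List Char
  | [] => []
  | [x] => tagL ++ x
  | x :: y :: rest => tagL ++ x ++ '\n' :: glue tagL (y :: rest)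

theorem replace_go_eq (new : List Char) :
    ∀ (fuel : Nat) (l acc : List Char), l.length ≤ fuel →
      PySem.Chars.replace.go ['\n'] new fuel l acc = acc.reverse ++ repC new l := by
  intro fuel
  induction fuel with
  | zero =>
      intro l acc h
      have : l = [] := by cases l <;> simp_all
      subst this; simp [PySem.Chars.replace.go, repC]
  | succ n ih =>
      intro l acc h
      cases l with
      | nil => simp [PySem.Chars.replace.go, repC]
      | cons c t =>
          by_cases hc : c = '\n'
          · subst hc
            rw [PySem.Chars.replace.go]
            simp only [List.isPrefixOf, BEq.rfl, Bool.and_self, if_true, List.length_nil, List.length_cons, List.drop_succ_cons, List.drop_zero]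
            rw [ih t (new.reverse ++ acc) (by simpa using Nat.le_of_succ_le_succ h)]
            simp [repC]
          · rw [PySem.Chars.replace.go]
            have : (['\n'].isPrefixOf (c :: t)) = false := by
              simp [List.isPrefixOf]; exact fun hcn => hc hcn.symm
            rw [this]
            simp only [Bool.false_eq_true, if_false]
            rw [ih t (c :: acc) (by simpa using Nat.le_of_succ_le_succ h)]
            simp [repC, hc]

theorem splitOn_go_eq :
    ∀ (fuel : Nat) (l cur : List Char) (acc : List (List Char)), l.length < fuel →
      PySem.Chars.splitOn.go ['\n'] fuel l cur acc = acc.reverse ++ mysplit cur.reverse l := by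
  intro fuel
  induction fuel with
  | zero => intro l cur acc h; omega
  | succ n ih =>
      intro l cur acc h
      cases l with
      | nil => simp [PySem.Chars.splitOn.go, mysplit]
      | cons c t =>
          by_cases hc : c = '\n'
          · subst hc
            rw [PySem.Chars.splitOn.go]
            simp only [List.isPrefixOf, BEq.rfl, Bool.and_self, if_true, List.length_nil, List.length_cons, List.drop_succ_cons, List.drop_zero]
            rw [ih t [] (cur.reverse :: acc) (by simpa using Nat.lt_of_succ_lt_succ h)]
            simp [mysplit]
          · rw [PySem.Chars.splitOn.go]
            have : (['\n'].isPrefixOf (c :: t)) = false := by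
              simp [List.isPrefixOf]; exact fun hcn => hc hcn.symm
            rw [this]
            simp only [Bool.false_eq_true, if_false]
            rw [ih t (c :: cur) acc (by simpa using Nat.lt_of_succ_lt_succ h)]
            simp [mysplit, hc]

theorem splitOn_eq_mysplit (cs : List Char) :
    PySem.Chars.splitOn cs ['\n'] = mysplit [] cs := by
  unfold PySem.Chars.splitOn
  rw [splitOn_go_eq (cs.length + 1) cs [] [] (Nat.lt_succ_self _)]
  simp

theorem mysplit_ne_nil : ∀ (l pre : List Char), mysplit pre l ≠ [] := by
  intro l
  induction l with
  | nil => intro pre; simp [mysplit]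
  | cons c t ih =>
      intro pre
      by_cases hc : c = '\n' <;> (simp [mysplit, hc]; try exact ih _)

theorem glue_mysplit (tagL : List Char) :
    ∀ (l pre : List Char),
      glue tagL (mysplit pre l) = tagL ++ pre ++ repC ('\n' :: tagL) l := by
  intro l
  induction l with
  | nil => intro pre; simp [mysplit, glue, repC]
  | cons c t ih =>
      intro pre
      by_cases hc : c = '\n'
      · subst hc
        simp only [mysplit, if_true]
        obtain ⟨y, rest, hyr⟩ : ∃ y rest, mysplit [] t = y :: rest := by
          cases hm : mysplit [] t with
          | nil => exact absurd hm (mysplit_ne_nil t [])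
          | cons y rest => exact ⟨y, rest, rfl⟩
        rw [hyr, glue, ← hyr, ih []]
        simp [repC]
      · simp only [mysplit, hc, if_false]
        rw [ih (pre ++ [c])]
        simp [repC, hc]

-- A's loop, characterised: folding over the index range from k appends glue of the line suffix
theorem foldA_eq (tag : String) (lines : List String) :
    ∀ (suffix : List String) (k : Nat) (acc : List Char),
      lines.drop k = suffix → k + suffix.length = lines.length →
      (PySem.List.pyRange (k : Int) (lines.length : Int) 1).foldl
        (fun result i =>
          let r := result ++ tag.toList ++ (PySem.List.pyGetD lines i "").toList
          if i < (lines.length : Int) - 1 then r ++ ['\n'] else r)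
        acc
      = acc ++ glue tag.toList (suffix.map String.toList) := by
  intro suffix
  induction suffix with
  | nil =>
      intro k acc hdrop hlen
      simp at hlen
      have hk : (k : Int) = (lines.length : Int) := by omega
      rw [hk]
      simp [PySem.List.pyRange, glue]
  | cons x rest ih =>
      intro k acc hdrop hlen
      have hklt : k < lines.length := by simp at hlen; omega
      have hcons : PySem.List.pyRange (k : Int) (lines.length : Int) 1
          = (k : Int) :: PySem.List.pyRange ((k : Int) + 1) (lines.length : Int) 1 :=
        PySem.List.pyRange_one_cons (by exact_mod_cast hklt)
      rw [hcons, List.foldl_cons]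
      have hx : PySem.List.pyGetD lines (k : Int) "" = x := by
        rw [PySem.List.pyGetD_natCast]
        have h9 : lines[k]? = some x := by
          rw [← List.head?_drop, hdrop]; rfl
        simp [List.getD, h9]
      cases rest with
      | nil =>
          have hk1 : k = lines.length - 1 := by simp at hlen; omega
          have hnlt : ¬ ((k : Int) < (lines.length : Int) - 1) := by omega
          simp only [hnlt, if_false, hx]
          have h2 : lines.drop (k + 1) = [] := by
            rw [List.drop_add_one_eq_tail_drop]
            simp [hdrop]
          rw [show ((k : Int) + 1) = ((k + 1 : Nat) : Int) by push_cast; ring]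
          rw [ih (k + 1) _ h2 (by simp at hlen ⊢; omega)]
          simp [glue]
      | cons y rest' =>
          have hlt : (k : Int) < (lines.length : Int) - 1 := by simp at hlen; omega
          simp only [hlt, if_true, hx]
          have h2 : lines.drop (k + 1) = y :: rest' := by
            rw [List.drop_add_one_eq_tail_drop]
            simp [hdrop]
          rw [show ((k : Int) + 1) = ((k + 1 : Nat) : Int) by push_cast; ring]
          rw [ih (k + 1) _ h2 (by simp at hlen ⊢; omega)]
          simp [glue]

theorem glue_map_ofList (tagL : List Char) :
    ∀ (ps : List (List Char)), glue tagL ((ps.map String.ofList).map String.toList) = glue tagL ps := by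
  intro ps
  have : (ps.map String.ofList).map String.toList = ps := by
    simp [List.map_map, Function.comp_def]
  rw [this]

-- ===== VERDICT (by name: the statement is the Claim_ definition above) =====
theorem add_tag_before_every_line_py_spec : Claim_equal_add_tag_before_every_line_py := by
  intro input_str tag _
  unfold Spec_add_tag_before_every_line_py add_tag_before_every_line_py add_tag_before_every_line_py_alt
  have hsplit : PySem.Str.split? input_str "\n"
      = some ((PySem.Chars.splitOn input_str.toList ['\n']).map String.ofList) := by
    simp [PySem.Str.split?, PySem.Chars.split?]
  rw [hsplit]
  simp only
  set lines := (PySem.Chars.splitOn input_str.toList ['\n']).map String.ofList with hlines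
  rw [show ((0 : Int)) = ((0 : Nat) : Int) by norm_num]
  rw [foldA_eq tag lines lines 0 [] (by simp) (by simp)]
  rw [hlines, glue_map_ofList, splitOn_eq_mysplit, glue_mysplit]
  unfold PySem.Chars.replace
  rw [if_neg (by simp)]
  rw [replace_go_eq ('\n' :: tag.toList) input_str.toList.length input_str.toList [] (le_refl _)]
  simp
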